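-- pv_equiv track=rewrite | github.com/tjsander/advent2023 | day12/day12.py | get_broken_count
-- ===== SOURCE A (Python) =====
-- def get_broken_count(spring):
--     broken = []
--     group = 0
--     for i in range(0, len(spring)):
--         sp = spring[i]
--         if (sp == "#"):
--             group += 1
--         else:
--             if (group > 0):
--                 broken.append(group)
--                 group = 0
--     if (group > 0):
--         broken.append(group)
--         group = 0
--     return broken
-- ===== SOURCE B (Python) =====
-- def get_broken_count(spring):
--     res = []
--     i = 0
--     n = len(spring)
--     while i < n:
--         if spring[i] == "#":
--             j = i
--             while j < n and spring[j] == "#":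
--                 j += 1
--             res.append(j - i)
--             i = j
--         else:
--             i += 1
--     return res
-- ===== Notes on version B (the rewrite author's own statement) =====
-- stated objective: alternative
-- what changed: B extracts each maximal run of '#' with an inner scan (two-pointer run extraction) instead of A's per-character running counter with a post-loop flush.
import Mathlib
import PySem

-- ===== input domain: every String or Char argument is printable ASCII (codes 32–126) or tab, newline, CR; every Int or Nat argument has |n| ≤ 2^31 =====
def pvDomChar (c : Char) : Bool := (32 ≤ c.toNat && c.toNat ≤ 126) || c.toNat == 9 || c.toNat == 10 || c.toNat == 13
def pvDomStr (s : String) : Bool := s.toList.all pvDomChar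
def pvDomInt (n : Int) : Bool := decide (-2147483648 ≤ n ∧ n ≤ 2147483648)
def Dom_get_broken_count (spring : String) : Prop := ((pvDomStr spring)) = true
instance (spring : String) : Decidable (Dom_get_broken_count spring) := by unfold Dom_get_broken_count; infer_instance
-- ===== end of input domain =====

-- B extracts maximal '#' runs with an inner scan (two-pointer) instead of A's per-character counter; same cost, alternative decomposition.

-- ===== PORT A =====
-- A: one pass over the characters with state (broken, group); trailing flush after the loop.
def get_broken_count (spring : String) : List Int :=
  let st := spring.toList.foldl
    (fun (st : List Int × Int) sp =>
      if sp = '#' then (st.1, st.2 + 1)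
      else if st.2 > 0 then (st.1 ++ [st.2], 0) else (st.1, st.2))
    ([], 0)
  if st.2 > 0 then st.1 ++ [st.2] else st.1

-- ===== PORT B =====
-- B's outer while: on a '#' the inner while scans to the end of the run (takeWhile/dropWhile = the j-scan), else step one char.
def pvRunsB : List Char → List Int
  | [] => []
  | c :: cs =>
      if c = '#' then
        (((cs.takeWhile (· = '#')).length : Int) + 1) :: pvRunsB (cs.dropWhile (· = '#'))
      else pvRunsB cs
termination_by cs => cs.length
decreasing_by
  · exact Nat.lt_succ_of_le (List.length_dropWhile_le _ _)
  · exact Nat.lt_succ_self _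

def get_broken_count_alt (spring : String) : List Int :=
  pvRunsB spring.toList

-- ===== PRECONDITION & SPEC =====
def Spec_get_broken_count (spring : String) (out : List Int) : Prop := out = get_broken_count_alt spring
instance (spring : String) (out : List Int) : Decidable (Spec_get_broken_count spring out) := by unfold Spec_get_broken_count; infer_instance

-- ===== CLAIM (what is proved, stated in full; the proofs are below) =====
def Claim_equal_get_broken_count : Prop := ∀ (spring : String), Dom_get_broken_count spring → Spec_get_broken_count spring (get_broken_count spring)

-- ===== LEMMAS AND PROOFS =====

def pvStepA (st : List Int × Int) (sp : Char) : List Int × Int :=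
  if sp = '#' then (st.1, st.2 + 1)
  else if st.2 > 0 then (st.1 ++ [st.2], 0) else (st.1, st.2)

-- continuation of A's run in progress (group = g) expressed in B's run language
def pvCont (g : Int) (cs : List Char) : List Int :=
  if g > 0 then (g + ((cs.takeWhile (· = '#')).length : Int)) :: pvRunsB (cs.dropWhile (· = '#'))
  else pvRunsB cs

theorem pvMain (cs : List Char) : ∀ (acc : List Int) (g : Int), 0 ≤ g →
    (let st := cs.foldl pvStepA (acc, g);
     if st.2 > 0 then st.1 ++ [st.2] else st.1) = acc ++ pvCont g cs := by
  induction cs with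
  | nil =>
    intro acc g hg
    simp only [List.foldl_nil, pvCont, List.takeWhile_nil, List.dropWhile_nil, pvRunsB]
    split_ifs with h
    · simp
    · simp
  | cons c cs ih =>
    intro acc g hg
    by_cases hc : c = '#'
    · subst hc
      simp only [List.foldl_cons, pvStepA, if_true]
      rw [ih acc (g + 1) (by omega)]
      congr 1
      simp only [pvCont, List.takeWhile_cons, List.dropWhile_cons, decide_eq_true_eq]
      by_cases hg0 : g > 0
      · rw [if_pos hg0, if_pos (by omega : g + 1 > 0)]
        congr 1
        simp only [if_true, List.length_cons]
        push_cast
        omega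
      · have hgz : g = 0 := by omega
        subst hgz
        rw [if_neg (by omega : ¬ (0:Int) > 0), if_pos (by omega : (0:Int) + 1 > 0), pvRunsB,
          if_pos rfl]
        congr 1
        push_cast
        omega
    · simp only [List.foldl_cons, pvStepA, if_neg hc]
      by_cases hg0 : g > 0
      · rw [if_pos hg0, ih (acc ++ [g]) 0 le_rfl]
        simp only [pvCont, if_pos hg0, if_neg (by omega : ¬ (0:Int) > 0)]
        rw [List.takeWhile_cons, List.dropWhile_cons]
        simp only [decide_eq_true_eq, if_neg hc]
        rw [pvRunsB]
        simp [hc]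
      · rw [if_neg hg0, ih acc g hg]
        congr 1
        have hgz : g = 0 := by omega
        subst hgz
        simp only [pvCont, if_neg (by omega : ¬ (0:Int) > 0)]
        rw [pvRunsB]
        simp [hc]

-- ===== VERDICT (by name: the statement is the Claim_ definition above) =====
theorem get_broken_count_spec : Claim_equal_get_broken_count := by
  intro spring _
  unfold Spec_get_broken_count get_broken_count get_broken_count_alt
  have := pvMain spring.toList [] 0 le_rfl
  simp only [pvCont, if_neg (by omega : ¬ (0:Int) > 0), List.nil_append] at this
  rw [← this]
  rfl
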